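-- pv_equiv track=rewrite | github.com/Skyparker0/AllLocalProgrammingProjects | Cool Projects/Natural language testing/anagram.py | solve_anagrams
-- ===== SOURCE A (Python) =====
-- def solve_anagrams(startString, words):
--     completedAnagrams = []
--     wordToGoal = {}
--
--     for word in words:
--         modifiedString = startString[:]
--         flag = True
--         for character in word:
--             if character in modifiedString:
--                 characterIndex = modifiedString.find(character)
--                 modifiedString = modifiedString[:characterIndex] \
--                     + modifiedString[characterIndex+1:]
--             else:
--                 flag = False
--                 break
--         if flag:
--             wordToGoal[word] = modifiedString
--
--     newWords = list(wordToGoal.keys())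
--
--     for word in wordToGoal:
--         if wordToGoal[word] == "":
--             completedAnagrams.append(word)
--         for extendedAnagram in solve_anagrams(wordToGoal[word],newWords):
--             completedAnagrams.append(word + " " + extendedAnagram)
--
--     completedAnagrams = set([" ".join(sorted(ana.split())) for ana in completedAnagrams])
--     return completedAnagrams
-- ===== SOURCE B (Python) =====
-- def solve_anagrams(startString, words):
--     return set(_expand(sorted(startString), words))
--
--
-- def _norm(phrase):
--     return " ".join(sorted(phrase.split()))
--
--
-- def _take(pool, word):
--     # subtract word's letters from the sorted letter pool (multiset difference)
--     rest = list(pool)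
--     for c in word:
--         if c in rest:
--             rest.remove(c)
--         else:
--             return None
--     return rest
--
--
-- def _expand(pool, words):
--     # one pass: filter, subtract and collect normalized phrases, deduplicating online
--     found = []
--     seen = []
--     for w in words:
--         if w in seen:
--             continue
--         rest = _take(pool, w)
--         if rest is None:
--             continue
--         if not rest:
--             p = _norm(w)
--             if p not in found:
--                 found.append(p)
--         else:
--             for tail in _expand(rest, words):
--                 p = _norm(w + " " + tail)
--                 if p not in found:
--                     found.append(p)
--         seen.append(w)
--     return found
-- ===== Notes on version B (the rewrite author's own statement) =====
-- stated objective: alternative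
-- what changed: Replaces A's per-level word->remainder dict, string find/slice surgery and batch per-level set comprehension (re-splitting and re-sorting every phrase) with a canonical sorted letter pool subtracted as a multiset, a single filtering pass per level that deduplicates normalized phrases online into an insertion-ordered accumulator, and a recursion that passes the original word list and the sorted pool instead of rebuilding a filtered word list.
import Mathlib
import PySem

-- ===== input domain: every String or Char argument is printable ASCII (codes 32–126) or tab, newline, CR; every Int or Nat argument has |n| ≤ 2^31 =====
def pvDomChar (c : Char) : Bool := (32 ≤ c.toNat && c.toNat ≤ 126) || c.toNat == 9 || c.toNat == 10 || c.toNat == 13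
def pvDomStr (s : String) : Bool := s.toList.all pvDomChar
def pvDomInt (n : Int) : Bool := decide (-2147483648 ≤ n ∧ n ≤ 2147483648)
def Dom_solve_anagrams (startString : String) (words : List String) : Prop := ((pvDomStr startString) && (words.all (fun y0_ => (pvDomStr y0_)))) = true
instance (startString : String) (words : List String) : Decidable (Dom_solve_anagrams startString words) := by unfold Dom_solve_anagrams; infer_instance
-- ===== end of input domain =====

-- B replaces A's per-level dict + string find/slice surgery + batch set comprehension by a
-- canonical sorted letter pool subtracted as a multiset with one online-deduplicating pass per
-- level (alternative structure, same exponential search).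


-- ' " ".join(sorted(ana.split())) ' — the phrase normalization both programs perform
def normKey (p : String) : String :=
  PySem.Str.join " " (PySem.List.sorted (PySem.Str.split₀ p) (fun x => x) false)

-- ===== PORT A =====
-- A's inner 'for character in word' loop: repeatedly find the character and splice it out of
-- modifiedString; string surgery is done on the code-point list (exact on all inputs).
def aSubLoop : List Char → List Char → List Char × Bool
  | [], m => (m, true)
  | c :: rest, m =>
    if PySem.Chars.isIn [c] m then
      let i := PySem.Chars.find m [c]
      aSubLoop rest (PySem.List.slice m none (some i) ++ PySem.List.slice m (some (i + 1)) none)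
    else (m, false)

-- A's first loop: build the dict wordToGoal
def aBuild (startString : String) (words : List String) : PySem.Dict String String :=
  words.foldl (fun d w =>
    let r := aSubLoop w.toList startString.toList
    if r.2 then d.insert w (String.ofList r.1) else d) PySem.Dict.empty

-- fuel = |startString| + 1 bounds the recursion depth (each fitting nonempty word shrinks the
-- string); on inputs excluded by Pre_ (an empty word) Python A recurses forever instead.
def solve_anagramsFuel : Nat → String → List String → List String
  | 0, _, _ => []
  | Nat.succ fuel, startString, words =>
    let wordToGoal := aBuild startString words
    let newWords := wordToGoal.keys
    let completed : List String := wordToGoal.items.foldl (fun acc p =>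
      (solve_anagramsFuel fuel p.2 newWords).foldl
        (fun a ext => a ++ [p.1 ++ " " ++ ext])
        (if p.2 = "" then acc ++ [p.1] else acc)) []
    PySem.Set.ofList (completed.map normKey)

def solve_anagrams (startString : String) (words : List String) : List String :=
  solve_anagramsFuel (startString.toList.length + 1) startString words

-- ===== PORT B =====
-- B's _take: subtract the word's letters from the pool (first-occurrence removal)
def takeChars : List Char → List Char → Option (List Char)
  | pool, [] => some pool
  | pool, c :: cs => if c ∈ pool then takeChars (pool.erase c) cs else none

-- B's _expand loop over the words, state = (found, seen)
def expandLoop (rec : List Char → List String → List String) (pool : List Char)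
    (allWords : List String) : List String → List String × List String → List String × List String
  | [], st => st
  | w :: r, st =>
    if w ∈ st.2 then expandLoop rec pool allWords r st
    else
      match takeChars pool w.toList with
      | none => expandLoop rec pool allWords r st
      | some rest =>
        if rest = [] then
          expandLoop rec pool allWords r (PySem.Set.add st.1 (normKey w), st.2 ++ [w])
        else
          expandLoop rec pool allWords r
            ((rec rest allWords).foldl (fun f t => PySem.Set.add f (normKey (w ++ " " ++ t))) st.1,
             st.2 ++ [w])

-- the same fuel bound as A's port (B's Python recursion terminates on exactly the same inputs)
def expandFuel : Nat → List Char → List String → List String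
  | 0, _, _ => []
  | Nat.succ fuel, pool, words => (expandLoop (expandFuel fuel) pool words words ([], [])).1

def solve_anagrams_alt (startString : String) (words : List String) : List String :=
  PySem.Set.ofList
    (expandFuel (startString.toList.length + 1)
      (PySem.List.sorted startString.toList (fun c => c) false) words)

-- ===== PRECONDITION & SPEC =====
-- Pre_ excludes word lists containing the empty string: there Python A (and Python B) recurse
-- forever on an unchanged string and raise RecursionError, returning nothing.
def Pre_solve_anagrams (_startString : String) (words : List String) : Prop := "" ∉ words
instance (startString : String) (words : List String) : Decidable (Pre_solve_anagrams startString words) := by unfold Pre_solve_anagrams; infer_instance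

def pvWitness_solve_anagrams : String × List String := ("tab", ["tab", "bat", "at", "b", "a", "t", "ab"])

def Spec_solve_anagrams (startString : String) (words : List String) (out : List String) : Prop := out = solve_anagrams_alt startString words
instance (startString : String) (words : List String) (out : List String) : Decidable (Spec_solve_anagrams startString words out) := by unfold Spec_solve_anagrams; infer_instance

-- ===== CLAIM (what is proved, stated in full; the proofs are below) =====
def Claim_equal_solve_anagrams : Prop := ∀ (startString : String) (words : List String), Dom_solve_anagrams startString words → Pre_solve_anagrams startString words → Spec_solve_anagrams startString words (solve_anagrams startString words)

-- ===== LEMMAS AND PROOFS =====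

-- proof-side abbreviations
def sortL (l : List Char) : List Char := PySem.List.sorted l (fun c => c) false
def fitsA (s w : String) : Bool := (aSubLoop w.toList s.toList).2
def aVal (s w : String) : String := String.ofList (aSubLoop w.toList s.toList).1
def fitNames (s : String) (ws : List String) : List String :=
  PySem.Set.ofList (ws.filter (fitsA s))

-- ----- string surgery = erase -----
theorem idxOf_min (m : List Char) (c : Char) (j : Nat) (hj : j < m.idxOf c) (hl : j < m.length) :
    m[j] ≠ c := by
  induction m generalizing j with
  | nil => simp at hl
  | cons a t ih =>
    by_cases hac : a = c
    · subst hac; simp [List.idxOf_cons_eq t rfl] at hj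
    · rw [List.idxOf_cons_ne t hac] at hj
      cases j with
      | zero => simpa using hac
      | succ k => simpa using ih k (by omega) (by simpa using hl)

theorem prefix_singleton_drop (m : List Char) (c : Char) (j : Nat) (hj : j < m.length) :
    [c] <+: m.drop j ↔ m[j] = c := by
  rw [List.drop_eq_getElem_cons hj, List.cons_prefix_cons]
  simp [eq_comm]

theorem find_singleton_idxOf (m : List Char) (c : Char) (h : c ∈ m) :
    PySem.Chars.find m [c] = (m.idxOf c : Int) := by
  have hin : [c] <:+: m := (List.singleton_infix_iff c m).mpr h
  have h0 : 0 ≤ PySem.Chars.find m [c] := (PySem.Chars.find_nonneg_iff m [c]).mpr hin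
  obtain ⟨hpre, hmin⟩ := PySem.Chars.find_spec (s := m) (sub := [c]) h0
  set n := (PySem.Chars.find m [c]).toNat with hn
  have hlen : n < m.length := by
    have := hpre.length_le
    simp [List.length_drop] at this
    omega
  have hne : m[n] = c := (prefix_singleton_drop m c n hlen).mp hpre
  have hidx : m.idxOf c < m.length := List.idxOf_lt_length_of_mem h
  have h1 : m.idxOf c ≤ n := by
    by_contra hlt
    exact idxOf_min m c n (by omega) hlen hne
  have h2 : ¬ n > m.idxOf c := by
    intro hgt
    exact hmin (m.idxOf c) hgt ((prefix_singleton_drop m c _ hidx).mpr (List.getElem_idxOf hidx))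
  omega

theorem splice_eq_erase (m : List Char) (c : Char) (h : c ∈ m) :
    PySem.List.slice m none (some (PySem.Chars.find m [c])) ++
      PySem.List.slice m (some (PySem.Chars.find m [c] + 1)) none = m.erase c := by
  rw [find_singleton_idxOf m c h]
  rw [PySem.List.slice_to m (Int.natCast_nonneg _), PySem.List.slice_from m (by omega)]
  have h1 : ((m.idxOf c : Int)).toNat = m.idxOf c := by omega
  have h2 : ((m.idxOf c : Int) + 1).toNat = m.idxOf c + 1 := by omega
  rw [h1, h2, ← List.eraseIdx_eq_take_drop_succ, List.erase_eq_eraseIdx_of_idxOf rfl]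

-- ----- sorted pools -----
theorem sortL_erase (l : List Char) (c : Char) : sortL (l.erase c) = (sortL l).erase c := by
  exact PySem.List.sorted_id_eq_of_perm_of_pairwise _ _
    ((PySem.List.sorted_perm l (fun c => c) false).erase c)
    (List.Pairwise.sublist List.erase_sublist (PySem.List.sorted_pairwise l (fun c => c)))

theorem mem_sortL (l : List Char) (c : Char) : c ∈ sortL l ↔ c ∈ l :=
  PySem.List.mem_sorted (xs := l) (key := fun c => c) (rev := false) (x := c)

theorem sortL_eq_nil_iff (l : List Char) : sortL l = [] ↔ l = [] :=
  PySem.List.sorted_eq_nil_iff (xs := l) (key := fun c : Char => c) (rev := false)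

-- B's subtraction on the sorted pool computes A's inner loop up to sorting
theorem take_sort (cs m : List Char) :
    takeChars (sortL m) cs =
      (if (aSubLoop cs m).2 then some (sortL (aSubLoop cs m).1) else none) := by
  induction cs generalizing m with
  | nil => simp [takeChars, aSubLoop]
  | cons c r ih =>
    by_cases hc : c ∈ m
    · have hisin : PySem.Chars.isIn [c] m = true := by
        rw [PySem.Chars.isIn_iff_infix]
        exact (List.singleton_infix_iff c m).mpr hc
      have hmem : c ∈ sortL m := (mem_sortL m c).mpr hc
      simp only [takeChars, aSubLoop, hisin, if_pos hmem, if_true]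
      rw [← sortL_erase, ← splice_eq_erase m c hc]
      exact ih _
    · have hisin : PySem.Chars.isIn [c] m = false := by
        rw [PySem.Chars.isIn_eq_false_iff]
        simp [List.singleton_infix_iff, hc]
      have hmem : c ∉ sortL m := fun hx => hc ((mem_sortL m c).mp hx)
      simp [takeChars, aSubLoop, hisin, hmem]

theorem take_subperm (p cs r : List Char) (h : takeChars p cs = some r) : r.Subperm p := by
  induction cs generalizing p with
  | nil =>
    simp [takeChars] at h
    exact h ▸ List.Subperm.refl p
  | cons c t ih =>
    by_cases hc : c ∈ p
    · simp only [takeChars, if_pos hc] at h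
      exact (ih _ h).trans (List.erase_subperm c p)
    · simp [takeChars, hc] at h

theorem take_mono (p q cs : List Char) (hs : p.Subperm q) (h : (takeChars p cs).isSome) :
    (takeChars q cs).isSome := by
  induction cs generalizing p q with
  | nil => simp [takeChars]
  | cons c t ih =>
    by_cases hc : c ∈ p
    · have hcq : c ∈ q := hs.subset hc
      simp only [takeChars, if_pos hc] at h
      simp only [takeChars, if_pos hcq]
      exact ih _ _ (hs.erase c) h
    · simp [takeChars, hc] at h

-- fitting is monotone: whatever fits a remainder of s fits s
theorem fits_mono (s w0 w : String) (h0 : fitsA s w0) (h : fitsA (aVal s w0) w) :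
    fitsA s w := by
  have h0' : takeChars (sortL s.toList) w0.toList = some (sortL (aSubLoop w0.toList s.toList).1) := by
    rw [take_sort]
    simp [fitsA] at h0
    simp [h0]
  have hv : (takeChars (sortL (aVal s w0).toList) w.toList).isSome := by
    rw [take_sort]
    simp [fitsA] at h
    simp [h]
  have hval : (aVal s w0).toList = (aSubLoop w0.toList s.toList).1 := String.toList_ofList
  rw [hval] at hv
  have := take_mono _ _ _ (take_subperm _ _ _ h0') hv
  rw [take_sort] at this
  by_contra hf
  simp only [Bool.not_eq_true, fitsA] at hf
  simp [hf] at this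

-- ----- first-occurrence sets -----
theorem ofList_filter (l : List String) (p : String → Bool) :
    (PySem.Set.ofList l).filter p = PySem.Set.ofList (l.filter p) := by
  induction l using List.reverseRecOn with
  | nil => simp
  | append_singleton l x ih =>
    rw [PySem.Set.ofList_append_singleton, List.filter_append]
    by_cases hm : x ∈ l
    · rw [PySem.Set.add_of_mem (by simpa [PySem.Set.mem_ofList] using hm)]
      by_cases hp : p x
      · have hxf : x ∈ l.filter p := List.mem_filter.mpr ⟨hm, hp⟩
        have h1 : List.filter p [x] = [x] := by simp [hp]
        rw [PySem.Set.ofList_append, h1, PySem.Set.update_cons, PySem.Set.update_nil,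
          PySem.Set.add_of_mem (by simpa [PySem.Set.mem_ofList] using hxf)]
        exact ih
      · simp [hp, ih]
    · rw [PySem.Set.add_of_not_mem (by simpa [PySem.Set.mem_ofList] using hm)]
      by_cases hp : p x
      · have h1 : List.filter p [x] = [x] := by simp [hp]
        have hxf : x ∉ l.filter p := fun hx => hm (List.mem_filter.mp hx).1
        rw [List.filter_append, h1, PySem.Set.ofList_append_singleton,
          PySem.Set.add_of_not_mem (by simpa [PySem.Set.mem_ofList] using hxf), ih]
      · simp [hp, ih, List.filter_append]

theorem fitNames_sub (s w0 : String) (ws : List String) (h0 : fitsA s w0) :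
    fitNames (aVal s w0) ws = (fitNames s ws).filter (fitsA (aVal s w0)) := by
  unfold fitNames
  rw [ofList_filter, List.filter_filter]
  congr 1
  apply List.filter_congr
  intro w _
  by_cases hw : fitsA (aVal s w0) w
  · simp [hw, fits_mono s w0 w h0 hw]
  · simp [hw]

-- ----- the dict -----
theorem getD_foldl_insert_fun (g : String → String) (l : List String)
    (d : PySem.Dict String String) (k dflt : String) :
    ((l.foldl (fun d x => d.insert x (g x)) d).getD k dflt) =
      if k ∈ l then g k else d.getD k dflt := by
  induction l generalizing d with
  | nil => simp
  | cons x l ih =>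
    rw [List.foldl_cons, ih]
    by_cases hkl : k ∈ l
    · simp [hkl]
    · by_cases hkx : k = x
      · subst hkx
        simp [hkl, PySem.Dict.getD_insert_self]
      · simp [hkl, hkx, PySem.Dict.getD_insert_of_ne d (g x) dflt hkx]

theorem aBuild_step (s : String) (ws : List String) :
    aBuild s ws = (ws.filter (fitsA s)).foldl (fun d w => d.insert w (aVal s w)) PySem.Dict.empty := by
  show ws.foldl (fun d w =>
      if fitsA s w then d.insert w (aVal s w) else d) PySem.Dict.empty = _
  rw [PySem.List.foldl_if_eq_foldl_filter]

theorem aBuild_keys (s : String) (ws : List String) : (aBuild s ws).keys = fitNames s ws := by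
  rw [aBuild_step, PySem.Dict.keys_foldl_insert]
  simp [PySem.Dict.keys_empty, PySem.Set.update_nil_left, fitNames]

theorem aBuild_items (s : String) (ws : List String) :
    (aBuild s ws).items = (fitNames s ws).map (fun w => (w, aVal s w)) := by
  have hnd : (aBuild s ws).keys.Nodup := by
    rw [aBuild_step]
    exact PySem.Dict.nodup_keys_foldl_insert _ _ _ (by simp [PySem.Dict.keys_empty])
  rw [PySem.Dict.items_eq_map_keys _ hnd "", aBuild_keys]
  apply List.map_congr_left
  intro w hw
  have hwf : w ∈ ws.filter (fitsA s) := by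
    simpa [fitNames, PySem.Set.mem_ofList] using hw
  have : (aBuild s ws).getD w "" = aVal s w := by
    rw [aBuild_step, getD_foldl_insert_fun]
    simp [hwf]
  rw [this]

-- ----- set/fold algebra -----
theorem foldl_update_ofList (l : List String) (g : String → List String) (A : List String) :
    l.foldl (fun f x => PySem.Set.update f (g x)) (PySem.Set.ofList A) =
      PySem.Set.ofList (A ++ l.flatMap g) := by
  induction l generalizing A with
  | nil => simp
  | cons x l ih =>
    rw [List.foldl_cons, ← PySem.Set.ofList_append, ih]
    simp

-- ----- the per-level contribution of one fitting word -----
def acontrib (fuel : Nat) (s : String) (nw : List String) (w : String) : List String :=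
  (if aVal s w = "" then [normKey w] else []) ++
    (solve_anagramsFuel fuel (aVal s w) nw).map (fun e => normKey (w ++ " " ++ e))

theorem aFuel_succ (fuel : Nat) (s : String) (ws : List String) :
    solve_anagramsFuel (fuel + 1) s ws =
      PySem.Set.ofList ((fitNames s ws).flatMap (acontrib fuel s (fitNames s ws))) := by
  simp only [solve_anagramsFuel]
  rw [aBuild_keys]
  congr 1
  -- rewrite the per-item step: inner append loop is a map, the 'if' prepends one element
  have hstep : ∀ (acc : List String) (p : String × String),
      (solve_anagramsFuel fuel p.2 (fitNames s ws)).foldl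
          (fun a ext => a ++ [p.1 ++ " " ++ ext])
          (if p.2 = "" then acc ++ [p.1] else acc) =
        acc ++ ((if p.2 = "" then [p.1] else []) ++
          (solve_anagramsFuel fuel p.2 (fitNames s ws)).map (fun ext => p.1 ++ " " ++ ext)) := by
    intro acc p
    rw [PySem.List.foldl_append_singleton_eq_map]
    by_cases hp : p.2 = "" <;> simp [hp]
  rw [PySem.List.foldl_congr_mem (aBuild s ws).items _
      (fun acc p => acc ++ ((if p.2 = "" then [p.1] else []) ++
        (solve_anagramsFuel fuel p.2 (fitNames s ws)).map (fun ext => p.1 ++ " " ++ ext))) []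
      (fun acc x _ => hstep acc x)]
  rw [PySem.List.foldl_append_eq_flatMap, List.nil_append, aBuild_items, List.map_flatMap,
    List.flatMap_map]
  unfold acontrib
  apply List.flatMap_congr
  intro w _
  by_cases hw : aVal s w = "" <;> simp [hw]

theorem aFuel_empty (fuel : Nat) (ws : List String) (h : "" ∉ ws) :
    solve_anagramsFuel fuel "" ws = [] := by
  have hfits : ∀ w ∈ ws, fitsA "" w = false := by
    intro w hw
    unfold fitsA
    cases hwl : w.toList with
    | nil => exact absurd (String.toList_eq_nil_iff.mp hwl) (fun he => h (he ▸ hw))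
    | cons c cs =>
      have hnin : PySem.Chars.isIn [c] [] = false := by
        rw [PySem.Chars.isIn_eq_false_iff]
        simp
      simp [aSubLoop, hnin]
  cases fuel with
  | zero => simp [solve_anagramsFuel]
  | succ n =>
    rw [aFuel_succ]
    have hnil : ws.filter (fitsA "") = [] :=
      List.filter_eq_nil_iff.mpr (fun w hw => by simp [hfits w hw])
    simp [fitNames, hnil]

theorem aFuel_nodup (fuel : Nat) (s : String) (ws : List String) :
    (solve_anagramsFuel fuel s ws).Nodup := by
  cases fuel with
  | zero => simp [solve_anagramsFuel]
  | succ n =>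
    simp only [solve_anagramsFuel]
    exact PySem.Set.nodup_ofList _

-- ----- B's loop -----
def bupd (rec : List Char → List String → List String) (pool : List Char) (aw : List String)
    (f : List String) (w : String) : List String :=
  match takeChars pool w.toList with
  | none => f
  | some rest =>
    if rest = [] then PySem.Set.add f (normKey w)
    else (rec rest aw).foldl (fun f t => PySem.Set.add f (normKey (w ++ " " ++ t))) f

def bsieve (pool : List Char) : List String → List String → List String
  | [], _ => []
  | w :: r, seen =>
    if w ∈ seen then bsieve pool r seen
    else if (takeChars pool w.toList).isSome then w :: bsieve pool r (seen ++ [w])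
    else bsieve pool r seen

theorem expandLoop_eq (rec : List Char → List String → List String) (pool : List Char)
    (aw r : List String) (st : List String × List String) :
    (expandLoop rec pool aw r st).1 = (bsieve pool r st.2).foldl (bupd rec pool aw) st.1 := by
  induction r generalizing st with
  | nil => simp [expandLoop, bsieve]
  | cons w r ih =>
    by_cases hw : w ∈ st.2
    · simp only [expandLoop, bsieve, if_pos hw]
      exact ih st
    · match htake : takeChars pool w.toList with
      | none =>
        simp only [expandLoop, bsieve, if_neg hw, htake, Option.isSome_none,
          Bool.false_eq_true, if_false]
        exact ih st
      | some rest =>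
        by_cases hrest : rest = []
        · subst hrest
          simp only [expandLoop, bsieve, if_neg hw, htake, Option.isSome_some, if_true]
          rw [ih]
          simp [bupd, htake]
        · simp only [expandLoop, bsieve, if_neg hw, htake, Option.isSome_some, if_true,
            if_neg hrest]
          rw [ih]
          simp [bupd, htake, hrest]

theorem bsieve_append (pool : List Char) (r seen : List String) :
    seen ++ bsieve pool r seen =
      PySem.Set.update seen (r.filter (fun w => (takeChars pool w.toList).isSome)) := by
  induction r generalizing seen with
  | nil => simp [bsieve, PySem.Set.update_nil]
  | cons w r ih =>
    by_cases hsome : (takeChars pool w.toList).isSome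
    · by_cases hw : w ∈ seen
      · rw [List.filter_cons, if_pos hsome, PySem.Set.update_cons, PySem.Set.add_of_mem hw]
        simp only [bsieve, if_pos hw]
        exact ih seen
      · rw [List.filter_cons, if_pos hsome, PySem.Set.update_cons, PySem.Set.add_of_not_mem hw]
        simp only [bsieve, if_neg hw, hsome, if_true]
        rw [← ih (seen ++ [w])]
        simp
    · rw [List.filter_cons, if_neg (by simpa using hsome)]
      by_cases hw : w ∈ seen
      · simp only [bsieve, if_pos hw]
        exact ih seen
      · simp only [bsieve, if_neg hw, hsome]
        simp only [Bool.false_eq_true, if_false]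
        exact ih seen

theorem bsieve_nil (pool : List Char) (r : List String) :
    bsieve pool r [] = PySem.Set.ofList (r.filter (fun w => (takeChars pool w.toList).isSome)) := by
  simpa using bsieve_append pool r []

-- ----- main equivalence -----
theorem solve_anagrams_main : ∀ (fuel : Nat) (s : String) (wsA wsB : List String),
    "" ∉ wsA → "" ∉ wsB → fitNames s wsA = fitNames s wsB →
    solve_anagramsFuel fuel s wsA = expandFuel fuel (sortL s.toList) wsB := by
  intro fuel
  induction fuel with
  | zero => intro s wsA wsB _ _ _; simp [solve_anagramsFuel, expandFuel]
  | succ fuel ih =>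
    intro s wsA wsB hA hB hfit
    have hnw : "" ∉ fitNames s wsA := fun hmem =>
      hA (List.mem_filter.mp ((PySem.Set.mem_ofList _ _).mp hmem)).1
    rw [aFuel_succ]
    show _ = (expandLoop (expandFuel fuel) (sortL s.toList) wsB wsB ([], [])).1
    rw [expandLoop_eq, bsieve_nil]
    have hfilt : wsB.filter (fun w => (takeChars (sortL s.toList) w.toList).isSome) =
        wsB.filter (fitsA s) := by
      apply List.filter_congr
      intro w _
      rw [take_sort]
      by_cases hf : (aSubLoop w.toList s.toList).2 <;> simp [fitsA, hf]
    rw [hfilt]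
    rw [show PySem.Set.ofList (wsB.filter (fitsA s)) = fitNames s wsA from by
      rw [hfit]; rfl]
    have hstep : ∀ (f : List String), ∀ w ∈ fitNames s wsA,
        bupd (expandFuel fuel) (sortL s.toList) wsB f w =
          PySem.Set.update f (acontrib fuel s (fitNames s wsA) w) := by
      intro f w hw
      have hfits : fitsA s w = true :=
        (List.mem_filter.mp ((PySem.Set.mem_ofList _ _).mp hw)).2
      have hfits' : (aSubLoop w.toList s.toList).2 = true := hfits
      have htake : takeChars (sortL s.toList) w.toList =
          some (sortL (aSubLoop w.toList s.toList).1) := by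
        rw [take_sort, if_pos hfits']
      simp only [bupd, htake]
      by_cases hm : sortL (aSubLoop w.toList s.toList).1 = []
      · have hmnil : (aSubLoop w.toList s.toList).1 = [] := (sortL_eq_nil_iff _).mp hm
        have hval : aVal s w = "" := by
          simp [aVal, hmnil]
        rw [if_pos hm]
        unfold acontrib
        rw [hval, aFuel_empty fuel _ hnw]
        simp [PySem.Set.update_cons, PySem.Set.update_nil]
      · rw [if_neg hm]
        have hvl : (aVal s w).toList = (aSubLoop w.toList s.toList).1 := String.toList_ofList
        have hval : aVal s w ≠ "" := by
          intro he
          rw [he] at hvl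
          have hm0 : (aSubLoop w.toList s.toList).1 = [] := by rw [← hvl]; simp
          exact hm (by rw [hm0]; simp [sortL, PySem.List.sorted_eq_nil_iff])
        have hidem : fitNames s (fitNames s wsA) = fitNames s wsA := by
          unfold fitNames
          rw [List.filter_eq_self.mpr (fun w hw =>
            (List.mem_filter.mp ((PySem.Set.mem_ofList _ _).mp hw)).2)]
          exact PySem.Set.ofList_eq_self_of_nodup _ (PySem.Set.nodup_ofList _)
        have hfit2 : fitNames (aVal s w) (fitNames s wsA) = fitNames (aVal s w) wsB := by
          rw [fitNames_sub s w _ hfits, fitNames_sub s w _ hfits, hidem, hfit]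
        have hrec : expandFuel fuel (sortL (aSubLoop w.toList s.toList).1) wsB =
            solve_anagramsFuel fuel (aVal s w) (fitNames s wsA) := by
          rw [ih (aVal s w) (fitNames s wsA) wsB hnw hB hfit2, hvl]
        rw [hrec]
        unfold acontrib
        rw [if_neg hval, List.nil_append, ← PySem.Set.update_map_eq_foldl_add]
    rw [PySem.List.foldl_congr_mem _ _
      (fun f w => PySem.Set.update f (acontrib fuel s (fitNames s wsA) w)) []
      (fun f w hw => hstep f w hw)]
    rw [show ([] : List String) = PySem.Set.ofList [] from rfl,
      foldl_update_ofList, List.nil_append]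

-- ===== VERDICT (by name: the statement is the Claim_ definition above) =====
theorem solve_anagrams_spec : Claim_equal_solve_anagrams := by
  intro s ws _hdom hpre
  unfold Spec_solve_anagrams solve_anagrams solve_anagrams_alt
  rw [show PySem.List.sorted s.toList (fun c => c) false = sortL s.toList from rfl,
    ← solve_anagrams_main (s.toList.length + 1) s ws ws hpre hpre rfl]
  exact Eq.symm (PySem.Set.ofList_eq_self_of_nodup _ (aFuel_nodup _ _ _))
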